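-- pv_equiv track=rewrite | github.com/dillondavis/MiningMeaningfulPhrases | src/purity.py | get_pattern_frequency
-- ===== SOURCE A (Python) =====
-- def get_pattern_frequency(pattern, frequent_patterns, single_patterns):
--     if pattern in frequent_patterns:
--         return frequent_patterns[pattern]
--
--     freq = set()
--     for i, word in enumerate(pattern):
--         if word not in single_patterns:
--             return 0
--         if i == 0:
--             freq = set(single_patterns[word])
--         else:
--             freq = freq.intersection(set(single_patterns[word]))
--
--     return len(freq)
-- ===== SOURCE B (Python) =====
-- def get_pattern_frequency(pattern, frequent_patterns, single_patterns):
--     if pattern in frequent_patterns: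
--         return frequent_patterns[pattern]
--     if not pattern:
--         return 0
--     occ_sets = []
--     for word in pattern:
--         if word not in single_patterns:
--             return 0
--         occ_sets.append(set(single_patterns[word]))
--     first, rest = occ_sets[0], occ_sets[1:]
--     return sum(1 for p in first if all(p in s for s in rest))
-- ===== Notes on version B (the rewrite author's own statement) =====
-- stated objective: simpler
-- what changed: Instead of maintaining a running set intersection across the loop, B collects each word's deduplicated occurrence set and returns a single filtered count over the first word's set of the positions present in every other set.
import Mathlib
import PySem

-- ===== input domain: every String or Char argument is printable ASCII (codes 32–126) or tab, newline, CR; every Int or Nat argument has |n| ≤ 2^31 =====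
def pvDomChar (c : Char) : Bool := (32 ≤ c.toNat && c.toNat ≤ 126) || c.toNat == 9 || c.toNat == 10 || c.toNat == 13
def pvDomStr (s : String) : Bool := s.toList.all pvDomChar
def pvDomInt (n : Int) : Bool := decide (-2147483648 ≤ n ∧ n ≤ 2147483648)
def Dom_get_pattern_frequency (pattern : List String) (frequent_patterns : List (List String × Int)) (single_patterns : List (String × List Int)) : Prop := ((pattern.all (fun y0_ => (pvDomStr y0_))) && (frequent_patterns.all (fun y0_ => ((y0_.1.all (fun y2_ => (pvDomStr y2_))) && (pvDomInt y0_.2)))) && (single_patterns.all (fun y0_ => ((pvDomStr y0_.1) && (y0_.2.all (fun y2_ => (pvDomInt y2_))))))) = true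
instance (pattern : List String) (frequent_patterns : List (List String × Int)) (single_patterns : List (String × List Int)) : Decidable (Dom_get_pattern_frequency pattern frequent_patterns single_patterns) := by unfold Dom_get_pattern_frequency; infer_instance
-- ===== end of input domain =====

-- B replaces A's running set-intersection with a single filtered count over the first
-- word's occurrence set (objective: simpler decomposition; same return value).

-- ===== PORT A =====
-- shared dict primitive: first-match lookup in an insertion-ordered association list
def pvLookup {A B : Type} [BEq A] (d : List (A × B)) (k : A) : Option B :=
  (d.find? (fun kv => kv.1 == k)).map (·.2)

-- A's for-loop over enumerate(pattern), carrying the running set 'freq'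
def pvALoop (single_patterns : List (String × List Int)) :
    List (Int × String) → PySem.Set Int → Int
  | [], freq => (freq.length : Int)
  | (i, word) :: rest, freq =>
    match pvLookup single_patterns word with
    | none => 0
    | some occ =>
      if i == 0 then pvALoop single_patterns rest (PySem.Set.ofList occ)
      else pvALoop single_patterns rest (PySem.Set.inter freq (PySem.Set.ofList occ))

def get_pattern_frequency (pattern : List String) (frequent_patterns : List (List String × Int)) (single_patterns : List (String × List Int)) : Int :=
  match pvLookup frequent_patterns pattern with
  | some v => v
  | none => pvALoop single_patterns (PySem.List.enumerate pattern) PySem.Set.empty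

-- ===== PORT B =====
-- B's collection loop: each word's deduplicated occurrence set, or none on a missing word
def pvOccSets (single_patterns : List (String × List Int)) :
    List String → Option (List (PySem.Set Int))
  | [] => some []
  | w :: ws =>
    match pvLookup single_patterns w with
    | none => none
    | some occ => (pvOccSets single_patterns ws).map (fun ss => PySem.Set.ofList occ :: ss)

def get_pattern_frequency_alt (pattern : List String) (frequent_patterns : List (List String × Int)) (single_patterns : List (String × List Int)) : Int :=
  match pvLookup frequent_patterns pattern with
  | some v => v
  | none =>
    if pattern.isEmpty then 0
    else
      match pvOccSets single_patterns pattern with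
      | none => 0
      | some [] => 0
      | some (first :: rest) =>
        (first.countP (fun p => rest.all (fun s => s.contains p)) : Int)

-- ===== PRECONDITION & SPEC =====
def Spec_get_pattern_frequency (pattern : List String) (frequent_patterns : List (List String × Int)) (single_patterns : List (String × List Int)) (out : Int) : Prop := out = get_pattern_frequency_alt pattern frequent_patterns single_patterns
instance (pattern : List String) (frequent_patterns : List (List String × Int)) (single_patterns : List (String × List Int)) (out : Int) : Decidable (Spec_get_pattern_frequency pattern frequent_patterns single_patterns out) := by unfold Spec_get_pattern_frequency; infer_instance

-- ===== CLAIM (what is proved, stated in full; the proofs are below) =====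
def Claim_equal_get_pattern_frequency : Prop := ∀ (pattern : List String) (frequent_patterns : List (List String × Int)) (single_patterns : List (String × List Int)), Dom_get_pattern_frequency pattern frequent_patterns single_patterns → Spec_get_pattern_frequency pattern frequent_patterns single_patterns (get_pattern_frequency pattern frequent_patterns single_patterns)

-- ===== LEMMAS AND PROOFS =====
theorem pv_foldl_inter {a : Type} [BEq a] (ss : List (PySem.Set a)) (freq : PySem.Set a) :
    ss.foldl PySem.Set.inter freq
      = freq.filter (fun p => ss.all (fun s => s.contains p)) := by
  induction ss generalizing freq with
  | nil => simp
  | cons s ss ih =>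
    simp only [List.foldl_cons, ih, PySem.Set.inter, List.filter_filter, List.all_cons]
    congr 1
    funext p
    exact Bool.and_comm _ _

theorem pvALoop_eq (sp : List (String × List Int)) (ws : List String) (k : Int)
    (hk : 1 ≤ k) (freq : PySem.Set Int) :
    pvALoop sp (PySem.List.enumerate ws k) freq
      = match pvOccSets sp ws with
        | none => 0
        | some ss => ((ss.foldl PySem.Set.inter freq).length : Int) := by
  induction ws generalizing k freq with
  | nil => simp [PySem.List.enumerate_nil, pvALoop, pvOccSets]
  | cons w ws ih =>
    rw [PySem.List.enumerate_cons]
    simp only [pvALoop, pvOccSets]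
    cases h : pvLookup sp w with
    | none => rfl
    | some occ =>
      have hne : (k == 0) = false := by simp; omega
      rw [hne]
      simp only [Bool.false_eq_true, if_false]
      rw [ih (k + 1) (by omega)]
      cases pvOccSets sp ws with
      | none => rfl
      | some ss => rfl

-- ===== VERDICT (by name: the statement is the Claim_ definition above) =====
theorem get_pattern_frequency_spec : Claim_equal_get_pattern_frequency := by
  intro pattern fp sp _
  unfold Spec_get_pattern_frequency get_pattern_frequency get_pattern_frequency_alt
  cases pvLookup fp pattern with
  | some v => rfl
  | none =>
    cases pattern with
    | nil => rfl
    | cons w ws =>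
      simp only [PySem.List.enumerate_cons, pvALoop, pvOccSets, List.isEmpty_cons,
        Bool.false_eq_true, if_false]
      cases h : pvLookup sp w with
      | none => rfl
      | some occ =>
        simp only [beq_self_eq_true, if_true]
        rw [show (0:Int) + 1 = 1 from rfl, pvALoop_eq sp ws 1 (by omega)]
        cases pvOccSets sp ws with
        | none => rfl
        | some ss =>
          simp only [Option.map_some]
          rw [pv_foldl_inter, List.countP_eq_length_filter]
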